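-- pv_equiv track=rewrite | github.com/simonberner/coding-dojo-python | farkle.py | __score_triple_dice
-- ===== SOURCE A (Python) =====
-- def __score_triple_dice(array_of_dice, turn_score):
--     score_map = {1: 1000, 2: 200, 3: 300, 4: 400, 5: 500, 6: 600}
--     for dice_value, score in score_map.items():
--         if array_of_dice.count(dice_value) == 3:
--             if len(array_of_dice) == 3:
--                 array_of_dice[:] = []
--             if len(array_of_dice) > 3:
--                 while dice_value in array_of_dice:
--                     array_of_dice.remove(dice_value)
--             turn_score += score
--     return turn_score
-- ===== SOURCE B (Python) =====
-- def __score_triple_dice(array_of_dice, turn_score):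
--     score_map = {1: 1000, 2: 200, 3: 300, 4: 400, 5: 500, 6: 600}
--     counts = {}
--     for d in array_of_dice:
--         counts[d] = counts.get(d, 0) + 1
--     triples = [v for v in score_map if counts.get(v, 0) == 3]
--     array_of_dice[:] = [d for d in array_of_dice if d not in triples]
--     return turn_score + sum(score_map[v] for v in triples)
-- ===== Notes on version B (the rewrite author's own statement) =====
-- stated objective: simpler
-- what changed: One counting pass builds a frequency dict, triples are read off the counts in a single comprehension and the list is rebuilt in one filtering pass, replacing A's per-value count() scans with interleaved while/remove loops and the len==3 special case.
import Mathlib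
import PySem

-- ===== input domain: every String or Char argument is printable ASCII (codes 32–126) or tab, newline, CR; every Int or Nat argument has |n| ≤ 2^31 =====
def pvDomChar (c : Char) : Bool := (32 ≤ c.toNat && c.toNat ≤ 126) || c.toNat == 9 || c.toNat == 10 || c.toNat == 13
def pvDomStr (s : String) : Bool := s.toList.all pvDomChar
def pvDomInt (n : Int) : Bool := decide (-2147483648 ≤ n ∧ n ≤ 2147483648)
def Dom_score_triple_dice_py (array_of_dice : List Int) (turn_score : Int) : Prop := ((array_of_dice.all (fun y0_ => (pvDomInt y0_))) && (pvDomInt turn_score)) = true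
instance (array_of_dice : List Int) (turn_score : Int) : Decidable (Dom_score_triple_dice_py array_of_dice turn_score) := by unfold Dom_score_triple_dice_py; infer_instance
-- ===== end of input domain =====

-- B replaces A's per-value count() scans with interleaved while/remove loops by one counting
-- pass plus one filter (objective: simpler).  Both Pythons mutate array_of_dice in place in the
-- same way; the equivalence proved here is about the RETURN value only.

-- ===== PORT A =====
-- the 'while dice_value in array_of_dice: array_of_dice.remove(dice_value)' loop
-- (list.remove on a present element is List.erase, cf. PySem.List.remove?_eq_some_erase)
def pvWhileRemove (v : Int) (arr : List Int) : List Int :=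
  if h : v ∈ arr then pvWhileRemove v (arr.erase v) else arr
termination_by arr.length
decreasing_by
  have h1 := List.length_erase_of_mem h
  have h2 : 0 < arr.length := List.length_pos_of_mem h
  omega

-- one iteration of A's 'for dice_value, score in score_map.items()' loop body
def pvStepA (st : List Int × Int) (p : Int × Int) : List Int × Int :=
  if PySem.List.count st.1 p.1 = 3 then
    let a1 := if st.1.length = 3 then ([] : List Int) else st.1
    let a2 := if 3 < a1.length then pvWhileRemove p.1 a1 else a1
    (a2, st.2 + p.2)
  else st

def score_triple_dice_py (array_of_dice : List Int) (turn_score : Int) : Int :=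
  let score_map : List (Int × Int) := [(1,1000),(2,200),(3,300),(4,400),(5,500),(6,600)]
  (score_map.foldl pvStepA (array_of_dice, turn_score)).2

-- ===== PORT B =====
def score_triple_dice_py_alt (array_of_dice : List Int) (turn_score : Int) : Int :=
  let score_map : PySem.Dict Int Int := PySem.Dict.ofList [(1,1000),(2,200),(3,300),(4,400),(5,500),(6,600)]
  let counts : PySem.Dict Int Int :=
    array_of_dice.foldl (fun c d => PySem.Dict.insert c d (PySem.Dict.getD c d 0 + 1)) PySem.Dict.empty
  let triples := (PySem.Dict.keys score_map).filter (fun v => PySem.Dict.getD counts v 0 == 3)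
  -- score_map[v] with v always a key of score_map: getD is exact here
  turn_score + (triples.map (fun v => PySem.Dict.getD score_map v 0)).sum

-- ===== PRECONDITION & SPEC =====
def Spec_score_triple_dice_py (array_of_dice : List Int) (turn_score : Int) (out : Int) : Prop := out = score_triple_dice_py_alt array_of_dice turn_score
instance (array_of_dice : List Int) (turn_score : Int) (out : Int) : Decidable (Spec_score_triple_dice_py array_of_dice turn_score out) := by unfold Spec_score_triple_dice_py; infer_instance

-- ===== CLAIM (what is proved, stated in full; the proofs are below) =====
def Claim_equal_score_triple_dice_py : Prop := ∀ (array_of_dice : List Int) (turn_score : Int), Dom_score_triple_dice_py array_of_dice turn_score → Spec_score_triple_dice_py array_of_dice turn_score (score_triple_dice_py array_of_dice turn_score)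

-- ===== LEMMAS AND PROOFS =====

-- removing every copy of v does not change the multiplicity of any other value
lemma pvWhileRemove_count_ne (v w : Int) (h : w ≠ v) (arr : List Int) :
    (pvWhileRemove v arr).count w = arr.count w := by
  fun_induction pvWhileRemove v arr with
  | case1 arr hmem ih => rw [ih, List.count_erase_of_ne h]
  | case2 arr hmem => rfl

-- if every element of arr is v, every other value has count 0
lemma pvCount_zero_of_full (arr : List Int) (v w : Int) (hc : arr.count v = arr.length)
    (h : w ≠ v) : arr.count w = 0 := by
  rw [List.count_eq_length] at hc
  rw [List.count_eq_zero]
  intro hw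
  exact h (hc w hw).symm

-- the accumulated score of A's loop depends only on the counts in the original list
lemma pvFoldA (keys : List (Int × Int)) (arr arr0 : List Int) (s : Int)
    (hnd : (keys.map Prod.fst).Nodup)
    (h : ∀ p ∈ keys, arr.count p.1 = arr0.count p.1) :
    (keys.foldl pvStepA (arr, s)).2
      = s + ((keys.filter (fun p => arr0.count p.1 == 3)).map Prod.snd).sum := by
  induction keys generalizing arr s with
  | nil => simp
  | cons p tl ih =>
    obtain ⟨dv, sc⟩ := p
    simp only [List.map_cons, List.nodup_cons] at hnd
    have h0 := h (dv, sc) (by simp)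
    have htl : ∀ q ∈ tl, q.1 ≠ dv := by
      intro q hq
      exact fun e => hnd.1 (e ▸ List.mem_map_of_mem hq)
    rw [List.foldl_cons, List.filter_cons]
    by_cases hc : arr.count dv = 3
    · have hc0 : arr0.count dv = 3 := h0 ▸ hc
      by_cases hl : arr.length = 3
      · have hstep : pvStepA (arr, s) (dv, sc) = ([], s + sc) := by
          simp [pvStepA, PySem.List.count_eq, hc, hl]
        rw [hstep, ih [] (s + sc) hnd.2 ?_]
        · simp [hc0]; ring
        · intro q hq
          have hz := pvCount_zero_of_full arr dv q.1 (by omega) (htl q hq)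
          rw [← h q (List.mem_cons_of_mem _ hq), hz]
          simp
      · have hgt : 3 < arr.length := by
          have := List.count_le_length (l := arr) (a := dv); omega
        have hstep : pvStepA (arr, s) (dv, sc) = (pvWhileRemove dv arr, s + sc) := by
          simp [pvStepA, PySem.List.count_eq, hc, hl, hgt]
        rw [hstep, ih (pvWhileRemove dv arr) (s + sc) hnd.2 ?_]
        · simp [hc0]; ring
        · intro q hq
          rw [pvWhileRemove_count_ne dv q.1 (htl q hq), h q (List.mem_cons_of_mem _ hq)]
    · have hc0 : ¬ arr0.count dv = 3 := h0 ▸ hc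
      have hstep : pvStepA (arr, s) (dv, sc) = (arr, s) := by
        simp [pvStepA, PySem.List.count_eq, hc]
      rw [hstep]
      simp only [show (arr0.count dv == 3) = false by simp [hc0]]
      exact ih arr s hnd.2 (fun q hq => h q (List.mem_cons_of_mem _ hq))

-- B's value in the same closed form
lemma pvAltEq (arr : List Int) (s : Int) :
    score_triple_dice_py_alt arr s
      = s + ((([(1,1000),(2,200),(3,300),(4,400),(5,500),(6,600)] : List (Int × Int)).filter
          (fun p => arr.count p.1 == 3)).map Prod.snd).sum := by
  unfold score_triple_dice_py_alt
  have hcnt : ∀ v : Int,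
      PySem.Dict.getD (arr.foldl (fun c d => PySem.Dict.insert c d (PySem.Dict.getD c d 0 + 1)) PySem.Dict.empty) v 0
        = (arr.count v : Int) := by
    intro v
    rw [PySem.Dict.getD_foldl_insert_add_one]
    simp [PySem.Dict.getD_empty]
  have hkeys : PySem.Dict.keys (PySem.Dict.ofList ([(1,1000),(2,200),(3,300),(4,400),(5,500),(6,600)] : List (Int × Int))) = [1,2,3,4,5,6] := by decide
  have hb : ∀ c : Nat, (((c : Int)) == 3) = (c == 3) := by
    intro c; by_cases hc : c = 3 <;> simp [hc] <;> omega
  simp only [hcnt, hkeys, hb]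
  by_cases h1 : arr.count 1 = 3 <;> by_cases h2 : arr.count 2 = 3 <;>
    by_cases h3 : arr.count 3 = 3 <;> by_cases h4 : arr.count 4 = 3 <;>
    by_cases h5 : arr.count 5 = 3 <;> by_cases h6 : arr.count 6 = 3 <;>
    simp [h1, h2, h3, h4, h5, h6] <;> decide

-- ===== VERDICT (by name: the statement is the Claim_ definition above) =====
theorem score_triple_dice_py_spec : Claim_equal_score_triple_dice_py := by
  intro arr s _
  unfold Spec_score_triple_dice_py
  rw [pvAltEq]
  unfold score_triple_dice_py
  exact pvFoldA _ arr arr s (by decide) (fun _ _ => rfl)
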